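-- pv_equiv track=rewrite | github.com/KingdaKilla/ti-radar | scripts/import_epo_bulk.py | normalize_applicant_name
-- ===== SOURCE A (Python) =====
-- _CORPORATE_SUFFIXES = sorted(
--     [
--         " CO LTD", " LTD", " INC", " CORP", " CORPORATION",
--         " GMBH", " AG", " SA", " SAS", " SE", " NV", " BV",
--         " KK", " AB", " OY", " AS", " PLC", " LLC", " PTY",
--         " & CO KG", " KG",
--     ],
--     key=len,
--     reverse=True,
-- )
--
-- def normalize_applicant_name(name: str) -> str:
--     """Firmenname normalisieren: UPPER, Punkte/Kommas entfernen, Suffix strippen."""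
--     name = name.upper().strip()
--     name = name.replace(".", "").replace(",", "")
--     for suffix in _CORPORATE_SUFFIXES:
--         if name.endswith(suffix):
--             name = name[: -len(suffix)].rstrip()
--             break
--     return " ".join(name.split())
-- ===== SOURCE B (Python) =====
-- # Token-based rewrite: split on single spaces once, compare/drop whole suffix
-- # token runs from the tail instead of endswith string tests + slicing + rstrip.
-- _SUFFIX_WORDS = [
--     ["CORPORATION"], ["&", "CO", "KG"], ["CO", "LTD"], ["CORP"], ["GMBH"],
--     ["LTD"], ["INC"], ["SAS"], ["PLC"], ["LLC"], ["PTY"],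
--     ["AG"], ["SA"], ["SE"], ["NV"], ["BV"], ["KK"], ["AB"], ["OY"],
--     ["AS"], ["KG"],
-- ]
--
-- def normalize_applicant_name(name: str) -> str:
--     tokens = name.upper().strip().replace(".", "").replace(",", "").split(" ")
--     for suf in _SUFFIX_WORDS:
--         k = len(suf)
--         if len(tokens) > k and tokens[-k:] == suf:
--             tokens = tokens[:-k]
--             break
--     return " ".join(" ".join(tokens).split())
-- ===== Notes on version B (the rewrite author's own statement) =====
-- stated objective: alternative
-- what changed: Replaces the endswith-string-test + negative-slice + rstrip loop with a tokeniser: the cleaned name is split on single spaces once, each corporate suffix is held as a list of words, and the first suffix whose word list equals the trailing tokens (with at least one token before it) is dropped from the token list.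
import Mathlib
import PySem

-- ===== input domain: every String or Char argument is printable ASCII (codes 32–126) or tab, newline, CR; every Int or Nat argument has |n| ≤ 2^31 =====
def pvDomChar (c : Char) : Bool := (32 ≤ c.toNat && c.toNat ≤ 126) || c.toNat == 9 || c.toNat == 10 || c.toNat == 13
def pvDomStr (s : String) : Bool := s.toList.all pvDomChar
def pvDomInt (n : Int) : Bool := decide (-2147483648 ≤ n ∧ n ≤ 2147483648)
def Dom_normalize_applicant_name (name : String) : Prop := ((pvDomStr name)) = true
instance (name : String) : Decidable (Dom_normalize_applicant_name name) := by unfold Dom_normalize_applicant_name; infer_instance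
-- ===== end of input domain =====

-- B replaces A's endswith/negative-slice/rstrip suffix loop by splitting the cleaned
-- name on single spaces once and dropping the first matching trailing run of suffix
-- words from the token list (objective: alternative algorithm, same cost).

-- ===== PORT A =====
def _CORPORATE_SUFFIXES : List String :=
  PySem.List.sorted
    [" CO LTD", " LTD", " INC", " CORP", " CORPORATION",
     " GMBH", " AG", " SA", " SAS", " SE", " NV", " BV",
     " KK", " AB", " OY", " AS", " PLC", " LLC", " PTY",
     " & CO KG", " KG"]
    (fun s => PySem.Str.len s) true

-- the 'for suffix in _CORPORATE_SUFFIXES: if name.endswith(suffix): …; break' loop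
def nanSuffixLoop : List (List Char) → List Char → List Char
  | [], n => n
  | sfx :: rest, n =>
    if PySem.Chars.endswith n sfx then
      PySem.Chars.rstrip (PySem.Chars.slice n none (some (-(sfx.length : Int))))
    else nanSuffixLoop rest n

def normalize_applicant_name (name : String) : String :=
  let n := PySem.Chars.strip (PySem.Chars.upper name.toList)
  let n := PySem.Chars.replace (PySem.Chars.replace n ['.'] []) [','] []
  let n := nanSuffixLoop (_CORPORATE_SUFFIXES.map String.toList) n
  String.ofList (PySem.Chars.join [' '] (PySem.Chars.split₀ n))

-- ===== PORT B =====
def _SUFFIX_WORDS : List (List String) :=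
  [["CORPORATION"], ["&", "CO", "KG"], ["CO", "LTD"], ["CORP"], ["GMBH"],
   ["LTD"], ["INC"], ["SAS"], ["PLC"], ["LLC"], ["PTY"],
   ["AG"], ["SA"], ["SE"], ["NV"], ["BV"], ["KK"], ["AB"], ["OY"],
   ["AS"], ["KG"]]

-- the 'for suf in _SUFFIX_WORDS: if len(tokens) > k and tokens[-k:] == suf: …; break' loop
def altSuffixLoop : List (List (List Char)) → List (List Char) → List (List Char)
  | [], toks => toks
  | suf :: rest, toks =>
    if suf.length < toks.length ∧ PySem.List.slice toks (some (-(suf.length : Int))) none = suf then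
      PySem.List.slice toks none (some (-(suf.length : Int)))
    else altSuffixLoop rest toks

def normalize_applicant_name_alt (name : String) : String :=
  let n := PySem.Chars.replace
    (PySem.Chars.replace (PySem.Chars.strip (PySem.Chars.upper name.toList)) ['.'] []) [','] []
  let toks := PySem.Chars.splitOn n [' ']
  let toks := altSuffixLoop (_SUFFIX_WORDS.map (List.map String.toList)) toks
  String.ofList (PySem.Chars.join [' '] (PySem.Chars.split₀ (PySem.Chars.join [' '] toks)))

-- ===== PRECONDITION & SPEC =====
def Spec_normalize_applicant_name (name : String) (out : String) : Prop := out = normalize_applicant_name_alt name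
instance (name : String) (out : String) : Decidable (Spec_normalize_applicant_name name out) := by unfold Spec_normalize_applicant_name; infer_instance

-- ===== CLAIM (what is proved, stated in full; the proofs are below) =====
def Claim_equal_normalize_applicant_name : Prop := ∀ (name : String), Dom_normalize_applicant_name name → Spec_normalize_applicant_name name (normalize_applicant_name name)

-- ===== LEMMAS AND PROOFS =====

-- the 21 suffixes, paired: A's suffix string (as chars) with B's word list for it
def pvPairs : List (List Char × List (List Char)) :=
  [(" CORPORATION".toList, ["CORPORATION".toList]),
   (" & CO KG".toList, ["&".toList, "CO".toList, "KG".toList]),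
   (" CO LTD".toList, ["CO".toList, "LTD".toList]),
   (" CORP".toList, ["CORP".toList]),
   (" GMBH".toList, ["GMBH".toList]),
   (" LTD".toList, ["LTD".toList]),
   (" INC".toList, ["INC".toList]),
   (" SAS".toList, ["SAS".toList]),
   (" PLC".toList, ["PLC".toList]),
   (" LLC".toList, ["LLC".toList]),
   (" PTY".toList, ["PTY".toList]),
   (" AG".toList, ["AG".toList]),
   (" SA".toList, ["SA".toList]),
   (" SE".toList, ["SE".toList]),
   (" NV".toList, ["NV".toList]),
   (" BV".toList, ["BV".toList]),
   (" KK".toList, ["KK".toList]),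
   (" AB".toList, ["AB".toList]),
   (" OY".toList, ["OY".toList]),
   (" AS".toList, ["AS".toList]),
   (" KG".toList, ["KG".toList])]

lemma pvPairs_fst : _CORPORATE_SUFFIXES.map String.toList = pvPairs.map Prod.fst := by decide

lemma pvPairs_snd : _SUFFIX_WORDS.map (List.map String.toList) = pvPairs.map Prod.snd := by decide

def pvGood (p : List Char × List (List Char)) : Prop :=
  p.1 = ' ' :: [' '].intercalate p.2 ∧ p.2 ≠ [] ∧ ∀ w ∈ p.2, ' ' ∉ w

lemma pvPairs_good : ∀ p ∈ pvPairs, pvGood p := by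
  intro p hp
  unfold pvGood
  fin_cases hp <;> refine ⟨by decide, by decide, by decide⟩

-- PySem's fuel-based splitOn with a one-char separator is Mathlib's List.splitOn
lemma pv_go_eq (c : Char) : ∀ (fuel : Nat) (l cur : List Char) (acc : List (List Char)), l.length < fuel →
    PySem.Chars.splitOn.go [c] fuel l cur acc
      = acc.reverse ++ (l.splitOn c).modifyHead (cur.reverse ++ ·) := by
  intro fuel
  induction fuel with
  | zero => intro l cur acc h; omega
  | succ f ih =>
    intro l cur acc h
    match l with
    | [] => simp [PySem.Chars.splitOn.go, List.splitOn_nil]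
    | x :: rest =>
      rw [PySem.Chars.splitOn.go]
      by_cases hx : x = c
      · subst hx
        have hp : [x].isPrefixOf (x :: rest) = true := by simp [List.isPrefixOf]
        simp only [hp, if_true]
        rw [ih _ _ _ (by simp at h ⊢; omega)]
        simp [List.splitOn, List.splitOnP_cons]
        cases List.splitOnP (fun y => y == x) rest <;> simp
      · have hp : [c].isPrefixOf (x :: rest) = false := by
          simp [List.isPrefixOf]
          exact fun hcx => absurd hcx.symm hx
        simp only [hp, Bool.false_eq_true, if_false]
        rw [ih _ _ _ (by simp at h ⊢; omega)]
        simp only [List.splitOn, List.splitOnP_cons, beq_iff_eq, hx, if_false]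
        cases List.splitOnP (fun y => y == c) rest <;> simp

lemma pv_splitOn_eq (cs : List Char) (c : Char) :
    PySem.Chars.splitOn cs [c] = cs.splitOn c := by
  rw [PySem.Chars.splitOn, pv_go_eq c _ _ _ _ (by omega)]
  cases cs.splitOn c <;> simp

lemma pv_splitOn_ne_nil {α : Type} [BEq α] (c : α) (cs : List α) : cs.splitOn c ≠ [] := by
  induction cs with
  | nil => simp [List.splitOn]
  | cons x t ih =>
    simp only [List.splitOn, List.splitOnP_cons] at *
    split_ifs
    · simp
    · cases h : List.splitOnP (fun y => y == c) t
      · exact absurd h ih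
      · simp

lemma pv_splitOn_append (c : Char) (p q : List Char) :
    (p ++ c :: q).splitOn c = p.splitOn c ++ q.splitOn c := by
  induction p with
  | nil => simp [List.splitOn, List.splitOnP_cons]
  | cons x t ih =>
    simp only [List.cons_append, List.splitOn, List.splitOnP_cons] at *
    split_ifs
    · simp [ih]
    · rw [ih]
      cases h : List.splitOnP (fun y => y == c) t with
      | nil => exact absurd h (by simpa [List.splitOn] using pv_splitOn_ne_nil c t)
      | cons a l => simp

lemma pv_intercalate_cons_cons (c : Char) (x y : List Char) (s : List (List Char)) :
    [c].intercalate (x :: y :: s) = x ++ c :: [c].intercalate (y :: s) := by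
  simp [List.intercalate]

lemma pv_intercalate_append (c : Char) (a b : List (List Char)) (ha : a ≠ []) (hb : b ≠ []) :
    [c].intercalate (a ++ b) = [c].intercalate a ++ c :: [c].intercalate b := by
  induction a with
  | nil => exact absurd rfl ha
  | cons x t ih =>
    cases t with
    | nil =>
      cases b with
      | nil => exact absurd rfl hb
      | cons y s =>
        rw [List.singleton_append, pv_intercalate_cons_cons]
        simp [List.intercalate]
    | cons z t' =>
      simp only [List.cons_append]
      rw [pv_intercalate_cons_cons c x z (t' ++ b), pv_intercalate_cons_cons c x z t']
      rw [show (z :: (t' ++ b)) = (z :: t') ++ b by simp, ih (by simp)]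
      simp

lemma pv_go_space_step (c : Char) (rest cur : List Char) (acc : List (List Char))
    (hc : PySem.Chars.isspace c = true) :
    PySem.Chars.split₀.go (c :: rest) cur acc
      = if cur.isEmpty then PySem.Chars.split₀.go rest [] acc
        else PySem.Chars.split₀.go rest [] (cur.reverse :: acc) := by
  rw [PySem.Chars.split₀.go]; simp [hc]

lemma pv_go_char_step (c : Char) (rest cur : List Char) (acc : List (List Char))
    (hc : PySem.Chars.isspace c = false) :
    PySem.Chars.split₀.go (c :: rest) cur acc = PySem.Chars.split₀.go rest (c :: cur) acc := by
  rw [PySem.Chars.split₀.go]; simp [hc]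

lemma pv_go_nil_eq (cur : List Char) (acc : List (List Char)) :
    PySem.Chars.split₀.go [] cur acc
      = if cur.isEmpty then acc.reverse else (cur.reverse :: acc).reverse := by
  rw [PySem.Chars.split₀.go]

lemma pv_go_allspace : ∀ (ws : List Char), (∀ x ∈ ws, PySem.Chars.isspace x = true) →
    ∀ (cur : List Char) (acc : List (List Char)),
    PySem.Chars.split₀.go ws cur acc = PySem.Chars.split₀.go [] cur acc := by
  intro ws
  induction ws with
  | nil => intro _ _ _; rfl
  | cons c rest ih =>
    intro h cur acc
    rw [pv_go_space_step c rest cur acc (h c (by simp))]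
    by_cases hcur : cur.isEmpty
    · rw [if_pos hcur, ih (fun x hx => h x (by simp [hx])), pv_go_nil_eq, pv_go_nil_eq]
      simp [hcur]
    · rw [if_neg hcur, ih (fun x hx => h x (by simp [hx])), pv_go_nil_eq, pv_go_nil_eq]
      simp [hcur]

lemma pv_go_append_spaces (ws : List Char) (hws : ∀ x ∈ ws, PySem.Chars.isspace x = true) :
    ∀ (xs cur : List Char) (acc : List (List Char)),
    PySem.Chars.split₀.go (xs ++ ws) cur acc = PySem.Chars.split₀.go xs cur acc := by
  intro xs
  induction xs with
  | nil => intro cur acc; simpa using pv_go_allspace ws hws cur acc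
  | cons c rest ih =>
    intro cur acc
    rw [List.cons_append]
    by_cases hc : PySem.Chars.isspace c
    · rw [pv_go_space_step c _ cur acc hc, pv_go_space_step c rest cur acc hc]
      by_cases hcur : cur.isEmpty <;> simp [hcur, ih]
    · rw [pv_go_char_step c _ cur acc (by simpa using hc),
        pv_go_char_step c rest cur acc (by simpa using hc), ih]

lemma pv_split₀_rstrip (cs : List Char) :
    PySem.Chars.split₀ (PySem.Chars.rstrip cs) = PySem.Chars.split₀ cs := by
  have hdec : cs = PySem.Chars.rstrip cs ++ (cs.reverse.takeWhile PySem.Chars.isspace).reverse := by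
    rw [PySem.Chars.rstrip, ← List.reverse_append, List.takeWhile_append_dropWhile,
      List.reverse_reverse]
  conv_rhs => rw [hdec]
  rw [PySem.Chars.split₀, PySem.Chars.split₀,
    pv_go_append_spaces _ (fun x hx => List.mem_takeWhile_imp (by simpa using hx))]

lemma pv_slice_neg_to {α : Type} (xs : List α) (m : Nat) (hm : 0 < m) (h : m ≤ xs.length) :
    PySem.List.slice xs none (some (-(m : Int))) = xs.take (xs.length - m) := by
  have h0 : ¬ ((xs.length : Int) + -(m : Int) < 0) := by omega
  simp [PySem.List.slice, PySem.List.clampIdx, h0, hm]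
  omega

lemma pv_slice_neg_from {α : Type} (xs : List α) (k : Nat) (hk : 0 < k) (h : k ≤ xs.length) :
    PySem.List.slice xs (some (-(k : Int))) none = xs.drop (xs.length - k) := by
  have h0 : ¬ ((xs.length : Int) + -(k : Int) < 0) := by omega
  simp [PySem.List.slice, PySem.List.clampIdx, h0, hk]
  rw [show ((xs.length : Int) + -(k : Int)).toNat = xs.length - k by omega]
  exact List.take_of_length_le (by simp [List.length_drop])

-- the two suffix loops agree modulo split₀-normalisation
lemma pv_loop_eq (ps : List (List Char × List (List Char))) (hps : ∀ p ∈ ps, pvGood p)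
    (cs : List Char) :
    PySem.Chars.split₀ (nanSuffixLoop (ps.map Prod.fst) cs)
      = PySem.Chars.split₀ (PySem.Chars.join [' ']
          (altSuffixLoop (ps.map Prod.snd) (PySem.Chars.splitOn cs [' ']))) := by
  induction ps generalizing cs with
  | nil =>
    simp only [List.map_nil, nanSuffixLoop, altSuffixLoop]
    rw [pv_splitOn_eq, PySem.Chars.join, List.intercalate_splitOn]
  | cons p rest ih =>
    obtain ⟨sfx, ws⟩ := p
    obtain ⟨hsf, hws, hnosp⟩ := hps (sfx, ws) (by simp)
    simp only at hsf hws hnosp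
    have hwpos : 0 < ws.length := List.length_pos_iff.mpr hws
    simp only [List.map_cons, nanSuffixLoop, altSuffixLoop]
    rw [pv_splitOn_eq]
    set T := cs.splitOn ' ' with hT
    by_cases hA : sfx <:+ cs
    · -- the suffix matches: both loops strip it and stop
      obtain ⟨pfx, hp⟩ := hA
      have hsplit : T = pfx.splitOn ' ' ++ ws := by
        rw [hT, ← hp, hsf, pv_splitOn_append, List.splitOn_intercalate ws ' ' hnosp hws]
      have hPne : pfx.splitOn ' ' ≠ [] := pv_splitOn_ne_nil ' ' pfx
      have hPlen : 0 < (pfx.splitOn ' ').length := List.length_pos_iff.mpr hPne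
      have hlen : ws.length < T.length := by rw [hsplit]; simp; omega
      have hcondB : ws.length < T.length ∧
          PySem.List.slice T (some (-(ws.length : Int))) none = ws := by
        refine ⟨hlen, ?_⟩
        rw [pv_slice_neg_from T ws.length hwpos (le_of_lt hlen), hsplit]
        simp
      rw [if_pos ((PySem.Chars.endswith_iff cs sfx).mpr ⟨pfx, hp⟩), if_pos hcondB]
      have hsfxlen : sfx.length ≤ cs.length := by rw [← hp]; simp
      have hsfxpos : 0 < sfx.length := by rw [hsf]; simp
      rw [pv_split₀_rstrip, PySem.Chars.slice_eq_listSlice,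
        pv_slice_neg_to cs sfx.length hsfxpos hsfxlen,
        show cs.length - sfx.length = pfx.length by rw [← hp]; simp,
        show cs.take pfx.length = pfx by rw [← hp]; exact List.take_left,
        pv_slice_neg_to T ws.length hwpos (le_of_lt hlen), hsplit,
        show (pfx.splitOn ' ' ++ ws).length - ws.length = (pfx.splitOn ' ').length by simp,
        List.take_left, PySem.Chars.join, List.intercalate_splitOn]
    · -- no match at this suffix: neither condition fires
      have hcondB : ¬ (ws.length < T.length ∧
          PySem.List.slice T (some (-(ws.length : Int))) none = ws) := by
        rintro ⟨hlen, hsl⟩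
        apply hA
        rw [pv_slice_neg_from T ws.length hwpos (le_of_lt hlen)] at hsl
        have hTd : T = T.take (T.length - ws.length) ++ ws := by
          conv_lhs => rw [← List.take_append_drop (T.length - ws.length) T]
          rw [hsl]
        have hT1ne : T.take (T.length - ws.length) ≠ [] := by
          have : (T.take (T.length - ws.length)).length = T.length - ws.length := by
            rw [List.length_take]; omega
          intro hnil
          rw [hnil] at this
          simp at this
          omega
        have hcs : cs = [' '].intercalate T := (List.intercalate_splitOn cs ' ').symm
        rw [hcs, hTd, pv_intercalate_append ' ' _ ws hT1ne hws, ← hsf]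
        exact ⟨[' '].intercalate (T.take (T.length - ws.length)), rfl⟩
      rw [if_neg (by simpa using fun h => hA ((PySem.Chars.endswith_iff cs sfx).mp h)),
        if_neg hcondB]
      have := ih (fun q hq => hps q (by simp [hq])) cs
      rw [pv_splitOn_eq] at this
      exact this

-- ===== VERDICT (by name: the statement is the Claim_ definition above) =====
theorem normalize_applicant_name_spec : Claim_equal_normalize_applicant_name := by
  intro name _
  unfold Spec_normalize_applicant_name normalize_applicant_name normalize_applicant_name_alt
  rw [pvPairs_fst, pvPairs_snd]
  exact congrArg String.ofList
    (congrArg (PySem.Chars.join [' ']) (pv_loop_eq pvPairs pvPairs_good _))
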